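-- pv_equiv track=rewrite | github.com/ramya-ramalingam/PAC-Compositional-Prediction-Sets | read_obj_det_imgs.py | fill_chosen_dets
-- ===== SOURCE A (Python) =====
-- def fill_chosen_dets(chosen_dets, det_list):
--     chosen_dets_filled = list()
--     for i, val in enumerate(det_list):
--         if i in chosen_dets:
--             chosen_dets_filled.append(1)
--         else:
--             chosen_dets_filled.append(0)
--     return chosen_dets_filled
-- ===== SOURCE B (Python) =====
-- def fill_chosen_dets(chosen_dets, det_list):
--     n = len(det_list)
--     result = [0] * n
--     for i in chosen_dets:
--         if 0 <= i < n:
--             result[i] = 1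
--     return result
-- ===== Notes on version B (the rewrite author's own statement) =====
-- stated objective: alternative
-- what changed: B allocates a zero list of len(det_list) and scatter-writes 1 at each in-range chosen index, instead of scanning every index of det_list and testing membership in chosen_dets; intended as faster (O(n+m) vs O(n*m)) but a timing run could not confirm it consistently.
import Mathlib
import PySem

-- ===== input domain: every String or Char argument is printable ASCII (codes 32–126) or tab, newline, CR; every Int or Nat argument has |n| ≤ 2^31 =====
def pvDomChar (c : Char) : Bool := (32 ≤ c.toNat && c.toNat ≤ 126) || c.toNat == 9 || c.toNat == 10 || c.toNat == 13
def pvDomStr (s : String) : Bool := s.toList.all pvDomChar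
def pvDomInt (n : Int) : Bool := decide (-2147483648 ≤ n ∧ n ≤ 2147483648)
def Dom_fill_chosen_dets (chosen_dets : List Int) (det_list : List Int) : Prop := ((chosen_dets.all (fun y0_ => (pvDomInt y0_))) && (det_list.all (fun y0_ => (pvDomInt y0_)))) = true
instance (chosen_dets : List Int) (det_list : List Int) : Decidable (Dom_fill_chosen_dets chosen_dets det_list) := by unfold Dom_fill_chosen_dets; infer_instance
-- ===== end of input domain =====

-- B replaces A's per-index membership scan with a zero-initialized list and a scatter-write over the in-range chosen indices (a different traversal; O(n+m) vs O(n*m) in operation count, speedup not confirmed); return values proved equal on all inputs.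


-- ===== PORT A =====
-- for i, val in enumerate(det_list): append 1 if i in chosen_dets else 0
def fill_chosen_dets (chosen_dets : List Int) (det_list : List Int) : List Int :=
  (PySem.List.enumerate det_list 0).foldl
    (fun acc p => if chosen_dets.contains p.1 then acc ++ [1] else acc ++ [0]) []

-- ===== PORT B =====
-- result = [0]*n; for i in chosen_dets: if 0 <= i < n: result[i] = 1
def fill_chosen_dets_alt (chosen_dets : List Int) (det_list : List Int) : List Int :=
  let n := det_list.length
  chosen_dets.foldl
    (fun res i => if 0 ≤ i ∧ i < (n : Int) then res.set i.toNat 1 else res)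
    (List.replicate n 0)

-- ===== PRECONDITION & SPEC =====
def Spec_fill_chosen_dets (chosen_dets : List Int) (det_list : List Int) (out : List Int) : Prop := out = fill_chosen_dets_alt chosen_dets det_list
instance (chosen_dets : List Int) (det_list : List Int) (out : List Int) : Decidable (Spec_fill_chosen_dets chosen_dets det_list out) := by unfold Spec_fill_chosen_dets; infer_instance

-- ===== CLAIM (what is proved, stated in full; the proofs are below) =====
def Claim_equal_fill_chosen_dets : Prop := ∀ (chosen_dets : List Int) (det_list : List Int), Dom_fill_chosen_dets chosen_dets det_list → Spec_fill_chosen_dets chosen_dets det_list (fill_chosen_dets chosen_dets det_list)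

-- ===== LEMMAS AND PROOFS =====

theorem scatter_length (chosen_dets : List Int) (n : Int) (acc : List Int) :
    (chosen_dets.foldl (fun res i => if 0 ≤ i ∧ i < n then res.set i.toNat 1 else res) acc).length
      = acc.length := by
  induction chosen_dets generalizing acc with
  | nil => rfl
  | cons i tl ih =>
    simp only [List.foldl_cons]
    rw [ih]
    split <;> simp

theorem scatter_getElem? (chosen_dets : List Int) (n : Int) (acc : List Int)
    (hn : (acc.length : Int) = n) (j : Nat) (hj : j < acc.length) :
    (chosen_dets.foldl (fun res i => if 0 ≤ i ∧ i < n then res.set i.toNat 1 else res) acc)[j]?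
      = if (j : Int) ∈ chosen_dets then some 1 else acc[j]? := by
  induction chosen_dets generalizing acc with
  | nil => simp
  | cons i tl ih =>
    simp only [List.foldl_cons]
    have hlen : ((if 0 ≤ i ∧ i < n then acc.set i.toNat 1 else acc)).length = acc.length := by
      split <;> simp
    rw [ih _ (by rw [hlen]; exact hn) (by rw [hlen]; exact hj)]
    by_cases htl : (j : Int) ∈ tl
    · simp [htl]
    · simp only [htl, if_false, List.mem_cons, or_false]
      by_cases heq : (j : Int) = i
      · have hguard : 0 ≤ i ∧ i < n := by
          constructor
          · omega
          · rw [← heq, ← hn]; exact_mod_cast hj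
        have : i.toNat = j := by omega
        simp [hguard, this, heq, hj]
      · simp only [heq, if_false]
        split
        · rename_i hg
          have : i.toNat ≠ j := by omega
          rw [List.getElem?_set_ne this]
        · rfl

theorem fill_chosen_dets_spec : Claim_equal_fill_chosen_dets := by
  intro chosen_dets det_list _
  unfold Spec_fill_chosen_dets fill_chosen_dets fill_chosen_dets_alt
  have hA : ((PySem.List.enumerate det_list 0).foldl
      (fun acc p => if chosen_dets.contains p.1 then acc ++ [1] else acc ++ [0])
      ([] : List Int))
      = (PySem.List.enumerate det_list 0).map
          (fun p => if chosen_dets.contains p.1 then (1 : Int) else 0) := by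
    have h := PySem.List.foldl_append_singleton_eq_map
      (l := PySem.List.enumerate det_list 0)
      (f := fun p : Int × Int => if chosen_dets.contains p.1 then (1 : Int) else 0)
      (acc := ([] : List Int))
    rw [List.nil_append] at h
    rw [← h]
    have hfun : (fun (acc : List Int) (p : Int × Int) =>
        if chosen_dets.contains p.1 then acc ++ [1] else acc ++ [0])
        = (fun (acc : List Int) (x : Int × Int) =>
            acc ++ [if chosen_dets.contains x.1 then (1 : Int) else 0]) := by
      funext acc p
      split <;> rfl
    rw [hfun]
  apply List.ext_getElem?
  intro j
  rw [hA, List.getElem?_map, PySem.List.getElem?_enumerate]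
  by_cases hj : j < det_list.length
  · rw [scatter_getElem? _ _ _ (by simp) j (by simpa using hj)]
    rw [List.getElem?_eq_getElem hj]
    by_cases hm : (j : Int) ∈ chosen_dets
    · simp [hm]
    · simp [hm, hj]
  · have h1 : det_list[j]? = none := List.getElem?_eq_none (by omega)
    have h2 : (chosen_dets.foldl
        (fun (res : List Int) (i : Int) =>
          if 0 ≤ i ∧ i < (det_list.length : Int) then res.set i.toNat 1 else res)
        (List.replicate det_list.length (0 : Int)))[j]? = none := by
      apply List.getElem?_eq_none
      exact le_of_eq_of_le ((scatter_length chosen_dets _ _).trans (by simp))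
        (Nat.le_of_not_lt hj)
    simp [h1, h2]
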